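-- pv_equiv track=rewrite | github.com/yangao07/NanoClu | cluster_by_splice_site.py | cigar_to_splice_site
-- ===== SOURCE A (Python) =====
-- def get_ref_op_length(cigartuples):
--     # get op length for MDNP=XB
--     # input: cigartuples is a list of tuples
--     # return: ref_len
--     op_len = 0
--     for c in cigartuples:
--         if c[0] == 0 or c[0] == 2 or c[0] == 3 or c[0] == 7 or c[0] == 8:
--             op_len += c[1]
--     return op_len
--
-- def cigar_to_splice_site(ref_start, cigar, min_intron_len):  # ref_start: 1-base
--     N_idx = [(i, item[1]) for i, item in enumerate(cigar) if item[0] == 3 and item[1] >= min_intron_len]  # 'N':3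
--     if len(N_idx) > 0:
--         five_site = []
--         three_site = []
--         cur_pos = ref_start
--         last_N = -1
--         for i, item in N_idx:
--             ref_len = get_ref_op_length(cigar[last_N + 1:i])
--             last_N = i
--
--             five_site.append(cur_pos + ref_len - 1)
--             three_site.append(cur_pos + ref_len + item)
--             cur_pos += (ref_len + item)
--         return five_site, three_site
--     else:
--         return [], []
-- ===== SOURCE B (Python) =====
-- def cigar_to_splice_site(ref_start, cigar, min_intron_len):  # ref_start: 1-base
--     # single pass: keep the running 1-based reference coordinate in cur
--     five_site, three_site = [], []
--     cur = ref_start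
--     for c0, c1 in cigar:
--         if c0 == 3:
--             if c1 >= min_intron_len:
--                 five_site.append(cur - 1)
--                 three_site.append(cur + c1)
--             cur += c1
--         elif c0 in (0, 2, 7, 8):
--             cur += c1
--     return five_site, three_site
-- ===== Notes on version B (the rewrite author's own statement) =====
-- stated objective: simpler
-- what changed: One single pass over cigar maintaining the running reference coordinate, replacing A's two-phase scheme (build an enumerate-filter index of qualifying N ops, then slice cigar between consecutive N ops and re-measure each slice with the get_ref_op_length helper).
import Mathlib
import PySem

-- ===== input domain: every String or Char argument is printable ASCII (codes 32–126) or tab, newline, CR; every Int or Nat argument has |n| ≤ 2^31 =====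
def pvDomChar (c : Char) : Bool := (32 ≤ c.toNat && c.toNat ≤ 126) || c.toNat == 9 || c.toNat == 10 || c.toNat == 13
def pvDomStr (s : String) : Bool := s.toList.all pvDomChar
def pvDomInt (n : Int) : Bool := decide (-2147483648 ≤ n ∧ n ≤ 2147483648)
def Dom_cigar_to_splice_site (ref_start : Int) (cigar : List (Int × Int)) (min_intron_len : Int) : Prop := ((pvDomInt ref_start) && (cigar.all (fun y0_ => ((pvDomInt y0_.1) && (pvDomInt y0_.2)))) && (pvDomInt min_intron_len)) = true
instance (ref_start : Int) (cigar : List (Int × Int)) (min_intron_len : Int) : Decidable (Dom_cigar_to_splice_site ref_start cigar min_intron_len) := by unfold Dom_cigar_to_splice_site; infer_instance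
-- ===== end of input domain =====

-- B replaces A's index-then-slice two-phase scheme by one single pass keeping the running
-- reference coordinate; objective: simpler.

-- ===== PORT A =====
-- get_ref_op_length
def get_ref_op_length (cigartuples : List (Int × Int)) : Int :=
  cigartuples.foldl
    (fun op_len c => if c.1 = 0 ∨ c.1 = 2 ∨ c.1 = 3 ∨ c.1 = 7 ∨ c.1 = 8 then op_len + c.2 else op_len) 0

-- body of A's 'for i, item in N_idx' loop; state = (five_site, three_site, cur_pos, last_N)
def pvStepA (cigar : List (Int × Int)) (st : List Int × List Int × Int × Int) (p : Int × Int) :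
    List Int × List Int × Int × Int :=
  let ref_len := get_ref_op_length (PySem.List.slice cigar (some (st.2.2.2 + 1)) (some p.1))
  (st.1 ++ [st.2.2.1 + ref_len - 1], st.2.1 ++ [st.2.2.1 + ref_len + p.2],
   st.2.2.1 + ref_len + p.2, p.1)

def cigar_to_splice_site (ref_start : Int) (cigar : List (Int × Int)) (min_intron_len : Int) : List Int × List Int :=
  let N_idx := ((PySem.List.enumerate cigar 0).filter
      (fun p => p.2.1 == 3 && decide (min_intron_len ≤ p.2.2))).map (fun p => (p.1, p.2.2))
  if N_idx.length > 0 then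
    let r := N_idx.foldl (pvStepA cigar) ([], [], ref_start, -1)
    (r.1, r.2.1)
  else ([], [])

-- ===== PORT B =====
-- body of B's single 'for c0, c1 in cigar' loop; state = (five_site, three_site, cur)
def pvStepB (min_intron_len : Int) (st : List Int × List Int × Int) (c : Int × Int) :
    List Int × List Int × Int :=
  if c.1 = 3 then
    if min_intron_len ≤ c.2 then
      (st.1 ++ [st.2.2 - 1], st.2.1 ++ [st.2.2 + c.2], st.2.2 + c.2)
    else (st.1, st.2.1, st.2.2 + c.2)
  else if c.1 = 0 ∨ c.1 = 2 ∨ c.1 = 7 ∨ c.1 = 8 then (st.1, st.2.1, st.2.2 + c.2)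
  else st

def cigar_to_splice_site_alt (ref_start : Int) (cigar : List (Int × Int)) (min_intron_len : Int) : List Int × List Int :=
  let r := cigar.foldl (pvStepB min_intron_len) ([], [], ref_start)
  (r.1, r.2.1)

-- ===== PRECONDITION & SPEC =====
def Spec_cigar_to_splice_site (ref_start : Int) (cigar : List (Int × Int)) (min_intron_len : Int) (out : List Int × List Int) : Prop := out = cigar_to_splice_site_alt ref_start cigar min_intron_len
instance (ref_start : Int) (cigar : List (Int × Int)) (min_intron_len : Int) (out : List Int × List Int) : Decidable (Spec_cigar_to_splice_site ref_start cigar min_intron_len out) := by unfold Spec_cigar_to_splice_site; infer_instance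

-- ===== CLAIM (what is proved, stated in full; the proofs are below) =====
def Claim_equal_cigar_to_splice_site : Prop := ∀ (ref_start : Int) (cigar : List (Int × Int)) (min_intron_len : Int), Dom_cigar_to_splice_site ref_start cigar min_intron_len → Spec_cigar_to_splice_site ref_start cigar min_intron_len (cigar_to_splice_site ref_start cigar min_intron_len)

-- ===== LEMMAS AND PROOFS =====

-- reference-consumed length of one op
def pvContrib (c : Int × Int) : Int :=
  if c.1 = 0 ∨ c.1 = 2 ∨ c.1 = 3 ∨ c.1 = 7 ∨ c.1 = 8 then c.2 else 0

-- common recursive specification of both programs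
def pvS (min_intron_len cur : Int) : List (Int × Int) → List Int × List Int
  | [] => ([], [])
  | c :: rest =>
    if c.1 = 3 then
      let r := pvS min_intron_len (cur + c.2) rest
      if min_intron_len ≤ c.2 then ((cur - 1) :: r.1, (cur + c.2) :: r.2) else r
    else if c.1 = 0 ∨ c.1 = 2 ∨ c.1 = 7 ∨ c.1 = 8 then
      pvS min_intron_len (cur + c.2) rest
    else pvS min_intron_len cur rest

theorem get_ref_op_length_shift (l : List (Int × Int)) : ∀ (a : Int),
    l.foldl (fun op_len c => if c.1 = 0 ∨ c.1 = 2 ∨ c.1 = 3 ∨ c.1 = 7 ∨ c.1 = 8 then op_len + c.2 else op_len) a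
      = a + l.foldl (fun op_len c => if c.1 = 0 ∨ c.1 = 2 ∨ c.1 = 3 ∨ c.1 = 7 ∨ c.1 = 8 then op_len + c.2 else op_len) 0 := by
  induction l with
  | nil => intro a; simp
  | cons c rest ih =>
    intro a
    simp only [List.foldl_cons]
    rw [ih (if c.1 = 0 ∨ c.1 = 2 ∨ c.1 = 3 ∨ c.1 = 7 ∨ c.1 = 8 then a + c.2 else a),
        ih (if c.1 = 0 ∨ c.1 = 2 ∨ c.1 = 3 ∨ c.1 = 7 ∨ c.1 = 8 then 0 + c.2 else 0)]
    split_ifs <;> ring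

theorem get_ref_op_length_cons (c : Int × Int) (l : List (Int × Int)) :
    get_ref_op_length (c :: l) = pvContrib c + get_ref_op_length l := by
  simp only [get_ref_op_length, pvContrib, List.foldl_cons]
  rw [get_ref_op_length_shift]
  split_ifs <;> ring

-- B's loop computes pvS (projections 1 and 2 of the state)
theorem loopB_eq (min_intron_len : Int) (l : List (Int × Int)) :
    ∀ (five three : List Int) (cur : Int),
      (l.foldl (pvStepB min_intron_len) (five, three, cur)).1
          = five ++ (pvS min_intron_len cur l).1
      ∧ (l.foldl (pvStepB min_intron_len) (five, three, cur)).2.1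
          = three ++ (pvS min_intron_len cur l).2 := by
  induction l with
  | nil => intro five three cur; simp [pvS]
  | cons c rest ih =>
    intro five three cur
    simp only [List.foldl_cons, pvStepB, pvS]
    split_ifs with h1 h2 h3
    · rcases ih (five ++ [cur - 1]) (three ++ [cur + c.2]) (cur + c.2) with ⟨e1, e2⟩
      simp [e1, e2]
    · exact ih five three (cur + c.2)
    · exact ih five three (cur + c.2)
    · exact ih five three cur

-- A's filter predicate on enumerated pairs
def pvQ (min_intron_len : Int) (p : Int × (Int × Int)) : Bool :=
  p.2.1 == 3 && decide (min_intron_len ≤ p.2.2)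

-- one non-qualifying (or already-consumed) op at position k: starting A's inner loop with
-- last_N = k-1 instead of k, with cur lowered by pvContrib c, gives the same outputs
theorem loopA_shift (full : List (Int × Int)) (c : Int × Int)
    (d : List (Int × Int)) (k : Nat) (hd : full.drop k = c :: d)
    (pairs : List (Int × Int))
    (hp : ∀ p ∈ pairs, ∃ j : Nat, j < d.length ∧ p.1 = ((k : Int) + 1) + (j : Int))
    (five three : List Int) (cur : Int) :
    (pairs.foldl (pvStepA full) (five, three, cur, (k : Int) - 1)).1
        = (pairs.foldl (pvStepA full) (five, three, cur + pvContrib c, (k : Int))).1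
    ∧ (pairs.foldl (pvStepA full) (five, three, cur, (k : Int) - 1)).2.1
        = (pairs.foldl (pvStepA full) (five, three, cur + pvContrib c, (k : Int))).2.1 := by
  cases pairs with
  | nil => exact ⟨rfl, rfl⟩
  | cons p ps =>
    obtain ⟨j, hj, hpj⟩ := hp p (List.mem_cons_self)
    have hdrop1 : full.drop (k + 1) = d := by
      have := List.drop_drop (l := full) (i := 1) (j := k)
      simp [this.symm, hd]
    have hslice1 : PySem.List.slice full (some ((k : Int) - 1 + 1)) (some p.1)
        = c :: d.take j := by
      have : (k : Int) - 1 + 1 = ((k : Nat) : Int) := by ring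
      rw [this, hpj]
      have : ((k : Int) + 1) + (j : Int) = (((k + 1 + j : Nat)) : Int) := by push_cast; ring
      rw [this, PySem.List.slice_natCast, hd]
      have : k + 1 + j - k = j + 1 := by omega
      simp [this, List.take_succ_cons]
    have hslice2 : PySem.List.slice full (some ((k : Int) + 1)) (some p.1) = d.take j := by
      have h1 : (k : Int) + 1 = (((k + 1 : Nat)) : Int) := by push_cast; ring
      rw [hpj, h1]
      have : (((k + 1 : Nat)) : Int) + (j : Int) = (((k + 1 + j : Nat)) : Int) := by push_cast; ring
      rw [this, PySem.List.slice_natCast, hdrop1]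
      have : k + 1 + j - (k + 1) = j := by omega
      simp [this]
    have hstep : pvStepA full (five, three, cur, (k : Int) - 1) p
        = pvStepA full (five, three, cur + pvContrib c, (k : Int)) p := by
      simp only [pvStepA, hslice1, hslice2, get_ref_op_length_cons]
      have hassoc : cur + (pvContrib c + get_ref_op_length (List.take j d))
          = cur + pvContrib c + get_ref_op_length (List.take j d) := by ring
      rw [hassoc]
    rw [List.foldl_cons, List.foldl_cons, hstep]
    exact ⟨rfl, rfl⟩

-- main invariant: A's inner loop over the qualifying N ops of the suffix full.drop k,
-- started at last_N = k-1, produces pvS of that suffix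
theorem loopA_eq (full : List (Int × Int)) (min_intron_len : Int) :
    ∀ (d : List (Int × Int)) (k : Nat), full.drop k = d →
    ∀ (five three : List Int) (cur : Int),
      ((((PySem.List.enumerate d (k : Int)).filter (pvQ min_intron_len)).map
          (fun p => (p.1, p.2.2))).foldl (pvStepA full) (five, three, cur, (k : Int) - 1)).1
        = five ++ (pvS min_intron_len cur d).1
      ∧ ((((PySem.List.enumerate d (k : Int)).filter (pvQ min_intron_len)).map
          (fun p => (p.1, p.2.2))).foldl (pvStepA full) (five, three, cur, (k : Int) - 1)).2.1
        = three ++ (pvS min_intron_len cur d).2 := by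
  intro d
  induction d with
  | nil => intro k hk five three cur; simp [PySem.List.enumerate_nil, pvS]
  | cons c d ih =>
    intro k hk five three cur
    have hdrop1 : full.drop (k + 1) = d := by
      have := List.drop_drop (l := full) (i := 1) (j := k)
      simp [this.symm, hk]
    have hk1 : ((k : Int) + 1) = (((k + 1 : Nat)) : Int) := by push_cast; ring
    have hpairs : ∀ p ∈ ((PySem.List.enumerate d ((k : Int) + 1)).filter
        (pvQ min_intron_len)).map (fun p => (p.1, p.2.2)),
        ∃ j : Nat, j < d.length ∧ p.1 = ((k : Int) + 1) + (j : Int) := by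
      intro p hp
      obtain ⟨q, hq, rfl⟩ := List.mem_map.1 hp
      have hq' := (List.mem_filter.1 hq).1
      obtain ⟨j, hj, rfl⟩ := (PySem.List.mem_enumerate_iff _ _ _).1 hq'
      exact ⟨j, hj, rfl⟩
    rw [PySem.List.enumerate_cons]
    by_cases hq : pvQ min_intron_len ((k : Int), c) = true
    · -- head is a qualifying N: first iteration emits the sites, last_N becomes k
      have hc3 : c.1 = 3 ∧ min_intron_len ≤ c.2 := by
        simpa [pvQ] using hq
      rw [List.filter_cons_of_pos hq, List.map_cons, List.foldl_cons]
      have hslice0 : PySem.List.slice full (some ((k : Int) - 1 + 1)) (some ((k : Int), c).1)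
          = ([] : List (Int × Int)) := by
        have : (k : Int) - 1 + 1 = ((k : Nat) : Int) := by ring
        simp only [this]
        rw [PySem.List.slice_natCast]
        simp
      have hstep : pvStepA full (five, three, cur, (k : Int) - 1) (((k : Int), c).1, ((k : Int), c).2.2)
          = (five ++ [cur - 1], three ++ [cur + c.2], cur + c.2, (k : Int)) := by
        simp only [pvStepA, hslice0, get_ref_op_length]
        simp
      rw [hstep]
      have hk' : (k : Int) = (((k + 1 : Nat)) : Int) - 1 := by push_cast; ring
      rw [hk1, hk']
      rcases ih (k + 1) hdrop1 (five ++ [cur - 1]) (three ++ [cur + c.2]) (cur + c.2) with ⟨e1, e2⟩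
      rw [e1, e2]
      simp [pvS, hc3.1, hc3.2, List.append_assoc]
    · -- head does not qualify: shift last_N from k-1 to k, cur by pvContrib c
      rw [List.filter_cons_of_neg (by simpa using hq)]
      rcases loopA_shift full c d k hk
          (((PySem.List.enumerate d ((k : Int) + 1)).filter (pvQ min_intron_len)).map
            (fun p => (p.1, p.2.2))) hpairs five three cur with ⟨s1, s2⟩
      rw [s1, s2]
      have hk' : (k : Int) = (((k + 1 : Nat)) : Int) - 1 := by push_cast; ring
      rw [hk1, hk']
      rcases ih (k + 1) hdrop1 five three (cur + pvContrib c) with ⟨e1, e2⟩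
      rw [e1, e2]
      have : ¬ (c.1 = 3 ∧ min_intron_len ≤ c.2) := by
        intro h; exact hq (by simp [pvQ, h.1, h.2])
      by_cases h3 : c.1 = 3
      · have hlt : ¬ min_intron_len ≤ c.2 := fun h => this ⟨h3, h⟩
        simp [pvS, h3, hlt, pvContrib]
      · by_cases hrc : c.1 = 0 ∨ c.1 = 2 ∨ c.1 = 7 ∨ c.1 = 8
        · have : c.1 = 0 ∨ c.1 = 2 ∨ c.1 = 3 ∨ c.1 = 7 ∨ c.1 = 8 := by tauto
          simp [pvS, h3, hrc, pvContrib]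
        · have : ¬ (c.1 = 0 ∨ c.1 = 2 ∨ c.1 = 3 ∨ c.1 = 7 ∨ c.1 = 8) := by tauto
          simp [pvS, h3, hrc, pvContrib]

-- if no pair qualifies, pvS produces ([], [])
theorem pvS_nil_of_no_qual (min_intron_len : Int) :
    ∀ (l : List (Int × Int)) (cur : Int),
      (∀ c ∈ l, ¬ (c.1 = 3 ∧ min_intron_len ≤ c.2)) → pvS min_intron_len cur l = ([], []) := by
  intro l
  induction l with
  | nil => intro cur _; rfl
  | cons c rest ih =>
    intro cur h
    have hc := h c (List.mem_cons_self)
    have hrest := fun x hx => h x (List.mem_cons_of_mem _ hx)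
    by_cases h3 : c.1 = 3
    · have hlt : ¬ min_intron_len ≤ c.2 := fun hle => hc ⟨h3, hle⟩
      simp [pvS, h3, hlt, ih _ hrest]
    · by_cases hrc : c.1 = 0 ∨ c.1 = 2 ∨ c.1 = 7 ∨ c.1 = 8
      · simp [pvS, h3, hrc, ih _ hrest]
      · simp [pvS, h3, hrc, ih _ hrest]

-- ===== VERDICT (by name: the statement is the Claim_ definition above) =====
theorem cigar_to_splice_site_spec : Claim_equal_cigar_to_splice_site := by
  intro ref_start cigar min_intron_len _
  unfold Spec_cigar_to_splice_site cigar_to_splice_site cigar_to_splice_site_alt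
  rcases loopB_eq min_intron_len cigar [] [] ref_start with ⟨b1, b2⟩
  rcases loopA_eq cigar min_intron_len cigar 0 (by simp) [] [] ref_start with ⟨a1, a2⟩
  simp only [Nat.cast_zero, zero_sub, List.nil_append] at a1 a2
  unfold pvQ at a1 a2
  simp only [List.nil_append] at b1 b2
  simp only [gt_iff_lt]
  split_ifs with hlen
  · show (_, _) = (_, _)
    rw [a1, a2, b1, b2]
  · have hempty : (PySem.List.enumerate cigar 0).filter
        (fun p => p.2.1 == 3 && decide (min_intron_len ≤ p.2.2)) = [] := by
      by_contra hne
      exact hlen (by simp only [List.length_map]; exact List.length_pos_iff.2 hne)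
    have hnq : ∀ c ∈ cigar, ¬ (c.1 = 3 ∧ min_intron_len ≤ c.2) := by
      intro c hc hcq
      have : c ∈ (PySem.List.enumerate cigar 0).map (·.2) := by
        rw [PySem.List.map_snd_enumerate]; exact hc
      obtain ⟨p, hp, hpc⟩ := List.mem_map.1 this
      have : p ∈ (PySem.List.enumerate cigar 0).filter
          (fun p => p.2.1 == 3 && decide (min_intron_len ≤ p.2.2)) := by
        refine List.mem_filter.2 ⟨hp, ?_⟩
        simp [hpc, hcq.1, hcq.2]
      rw [hempty] at this
      exact absurd this (List.not_mem_nil)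
    rw [b1, b2, pvS_nil_of_no_qual min_intron_len cigar ref_start hnq]
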